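-- pv_equiv track=rewrite | github.com/peter-k-1972/linux-desktop-ai-chat | app/services/unified_model_catalog_service.py | model_id_in_runtime_name_set
-- ===== SOURCE A (Python) =====
-- from typing import Any, Dict, List, Optional, Set, Tuple
--
-- def model_id_in_runtime_name_set(names: Set[str], model_id: str) -> bool:
--     """
--     Prüft, ob eine Modell-ID in Ollama/Cloud-Namen vorkommt.
--
--     Registry oder ModelAsset nutzen oft Basisnamen (``llama3``), Ollama listet
--     ``llama3:latest`` / ``llama3:8b`` — ohne diese Logik wirken zugewiesene
--     ~/ai-Assets fälschlich „nicht in Ollama“ und verschwinden aus der Chat-Auswahl.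
--     """
--     mid = (model_id or "").strip()
--     if not mid or not names:
--         return False
--     if mid in names:
--         return True
--     if ":" not in mid:
--         prefix = mid + ":"
--         return any(n == mid or n.startswith(prefix) for n in names)
--     base, sep, tag = mid.partition(":")
--     if not sep:
--         return False
--     for n in names:
--         if n == mid:
--             return True
--         nb, _, nt = n.partition(":")
--         if nb == base and nt == tag:
--             return True
--     return False
-- ===== SOURCE B (Python) =====
-- def model_id_in_runtime_name_set(names, model_id):
--     mid = (model_id or "").strip()
--     if not mid or not names:
--         return False
--     index = {}
--     for n in names:
--         nb, _, nt = n.partition(":")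
--         index.setdefault(nb, set()).add(nt)
--     base, sep, tag = mid.partition(":")
--     if not sep:
--         return base in index
--     return tag in index.get(base, set())
-- ===== Notes on version B (the rewrite author's own statement) =====
-- stated objective: idiomatic
-- what changed: B replaces A's three branch-specific linear scans (membership test, startswith scan, partition-matching loop) by one grouping pass that builds a base->tags index dict and answers with a single lookup.
import Mathlib
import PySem

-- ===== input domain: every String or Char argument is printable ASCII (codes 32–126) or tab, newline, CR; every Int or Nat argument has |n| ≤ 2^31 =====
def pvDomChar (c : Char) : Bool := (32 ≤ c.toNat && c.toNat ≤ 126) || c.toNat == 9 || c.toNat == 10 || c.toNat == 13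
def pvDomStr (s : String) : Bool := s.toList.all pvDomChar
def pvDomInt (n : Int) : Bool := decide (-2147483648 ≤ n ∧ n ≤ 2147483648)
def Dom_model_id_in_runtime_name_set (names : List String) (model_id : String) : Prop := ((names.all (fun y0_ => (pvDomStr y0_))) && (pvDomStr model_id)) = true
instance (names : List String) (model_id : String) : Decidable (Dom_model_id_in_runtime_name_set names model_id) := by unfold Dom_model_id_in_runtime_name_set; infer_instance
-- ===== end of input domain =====

-- B builds a base->tags index dict in one grouping pass and answers with a single lookup,
-- replacing A's three branch-specific linear scans; equivalence proved for all inputs.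


-- hand port of Python's s.partition(":") on a list of chars; exact: splits at the FIRST ':',
-- returns (before, colon-found?, after); (cs, false, []) when no ':' occurs.
def pyPartitionColon : List Char → List Char × Bool × List Char
  | [] => ([], false, [])
  | c :: rest =>
    if c = ':' then ([], true, rest)
    else
      let p := pyPartitionColon rest
      (c :: p.1, p.2.1, p.2.2)

-- ===== PORT A =====
def model_id_in_runtime_name_set (names : List String) (model_id : String) : Bool :=
  let ns := names.map String.toList
  let mid := PySem.Chars.strip model_id.toList
  if mid.isEmpty || ns.isEmpty then false
  else if ns.contains mid then true
  else if !(PySem.Chars.isIn [':'] mid) then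
    -- prefix = mid + ":" ; any(n == mid or n.startswith(prefix) for n in names)
    ns.any (fun n => n == mid || PySem.Chars.startswith n (mid ++ [':']))
  else
    let p := pyPartitionColon mid
    if !p.2.1 then false
    else
      -- for n in names: n == mid, or partition n and compare base/tag
      ns.any (fun n => n == mid ||
        (let q := pyPartitionColon n
         q.1 == p.1 && q.2.2 == p.2.2))

-- B's loop body: index.setdefault(nb, set()).add(nt)  ==  modify nb (default empty set) (add nt)
def pvStep (d : PySem.Dict (List Char) (PySem.Set (List Char))) (n : String) :
    PySem.Dict (List Char) (PySem.Set (List Char)) :=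
  let q := pyPartitionColon n.toList
  d.modify q.1 PySem.Set.empty (fun s => PySem.Set.add s q.2.2)

-- ===== PORT B =====
def model_id_in_runtime_name_set_alt (names : List String) (model_id : String) : Bool :=
  let mid := PySem.Chars.strip model_id.toList
  if mid.isEmpty || names.isEmpty then false
  else
    let index : PySem.Dict (List Char) (PySem.Set (List Char)) :=
      names.foldl pvStep PySem.Dict.empty
    let p := pyPartitionColon mid
    if !p.2.1 then index.contains p.1
    else PySem.Set.contains (index.getD p.1 PySem.Set.empty) p.2.2

-- ===== PRECONDITION & SPEC =====
def Spec_model_id_in_runtime_name_set (names : List String) (model_id : String) (out : Bool) : Prop := out = model_id_in_runtime_name_set_alt names model_id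
instance (names : List String) (model_id : String) (out : Bool) : Decidable (Spec_model_id_in_runtime_name_set names model_id out) := by unfold Spec_model_id_in_runtime_name_set; infer_instance

-- ===== CLAIM (what is proved, stated in full; the proofs are below) =====
def Claim_equal_model_id_in_runtime_name_set : Prop := ∀ (names : List String) (model_id : String), Dom_model_id_in_runtime_name_set names model_id → Spec_model_id_in_runtime_name_set names model_id (model_id_in_runtime_name_set names model_id)

-- ===== LEMMAS AND PROOFS =====

theorem partColon_yes {b : List Char} (t : List Char) (h : ':' ∉ b) :
    pyPartitionColon (b ++ ':' :: t) = (b, true, t) := by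
  induction b with
  | nil => simp [pyPartitionColon]
  | cons c rest ih =>
    simp only [List.mem_cons, not_or] at h
    simp [pyPartitionColon, Ne.symm h.1, ih h.2]

theorem partColon_cases (cs : List Char) :
    (':' ∉ cs ∧ pyPartitionColon cs = (cs, false, [])) ∨
    (∃ b t, ':' ∉ b ∧ cs = b ++ ':' :: t ∧ pyPartitionColon cs = (b, true, t)) := by
  induction cs with
  | nil => exact Or.inl ⟨by simp, rfl⟩
  | cons c rest ih =>
    by_cases hc : c = ':'
    · subst hc
      exact Or.inr ⟨[], rest, by simp, by simp, by simp [pyPartitionColon]⟩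
    · rcases ih with ⟨hm, he⟩ | ⟨b, t, hb, he, hp⟩
      · exact Or.inl ⟨by simp [hm, Ne.symm hc], by simp [pyPartitionColon, hc, he]⟩
      · exact Or.inr ⟨c :: b, t, by simp [hb, Ne.symm hc], by simp [he], by simp [pyPartitionColon, hc, hp]⟩

-- membership in a PySem.Set after .add, as a Bool equation
theorem setContainsAdd {s : PySem.Set (List Char)} {x t : List Char} :
    (PySem.Set.add s x).contains t = (s.contains t || t == x) := by
  by_cases hx : t = x
  · subst hx
    simp [PySem.Set.add]
    split <;> simp_all
  · simp [PySem.Set.add]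
    split <;> simp [hx]

theorem idx_contains (ns : List String) (d : PySem.Dict (List Char) (PySem.Set (List Char))) (b : List Char) :
    (ns.foldl pvStep d).contains b
      = (d.contains b || ns.any (fun n => (pyPartitionColon n.toList).1 == b)) := by
  induction ns generalizing d with
  | nil => simp
  | cons n rest ih =>
    simp only [List.foldl_cons, List.any_cons, ih]
    rw [show (pvStep d n).contains b = ((pyPartitionColon n.toList).1 == b || d.contains b) from by
      simp [pvStep, PySem.Dict.contains_modify, BEq.comm]]
    cases h : ((pyPartitionColon n.toList).1 == b) <;> simp

theorem idx_getD (ns : List String) (d : PySem.Dict (List Char) (PySem.Set (List Char))) (b t : List Char) :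
    ((ns.foldl pvStep d).getD b PySem.Set.empty).contains t
      = ((d.getD b PySem.Set.empty).contains t
         || ns.any (fun n => (pyPartitionColon n.toList).1 == b && (pyPartitionColon n.toList).2.2 == t)) := by
  induction ns generalizing d with
  | nil => simp
  | cons n rest ih =>
    simp only [List.foldl_cons, List.any_cons, ih]
    rw [show (pvStep d n).getD b PySem.Set.empty
          = if b = (pyPartitionColon n.toList).1
            then PySem.Set.add (d.getD (pyPartitionColon n.toList).1 PySem.Set.empty) (pyPartitionColon n.toList).2.2
            else d.getD b PySem.Set.empty from by
      simp [pvStep, PySem.Dict.getD_modify]]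
    by_cases hb : b = (pyPartitionColon n.toList).1
    · subst hb
      have h2' : (t == (pyPartitionColon n.toList).2.2) = ((pyPartitionColon n.toList).2.2 == t) := by
        simp [BEq.comm]
      rw [if_pos rfl, setContainsAdd, h2']
      cases h1 : (d.getD (pyPartitionColon n.toList).1 PySem.Set.empty).contains t <;>
        cases h2 : ((pyPartitionColon n.toList).2.2 == t) <;> simp
    · rw [if_neg hb]
      have : ((pyPartitionColon n.toList).1 == b) = false := by
        simp [BEq.comm]; exact fun h => hb h
      simp [this]

-- ':' in mid  ==  the partition found a separator
theorem isInColon (cs : List Char) : PySem.Chars.isIn [':'] cs = (pyPartitionColon cs).2.1 := by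
  rcases partColon_cases cs with ⟨hm, hp⟩ | ⟨b, t, hb, he, hp⟩
  · rw [hp, PySem.Chars.isIn_eq_false_iff]
    intro hinf
    exact hm (hinf.sublist.mem (by simp))
  · rw [hp]
    rw [PySem.Chars.isIn_iff_infix, he]
    exact ⟨b, t, by simp⟩

-- A's no-colon test (n == mid or n.startswith(mid + ":")) is exactly "n's base is mid"
theorem pointwise_nocolon {mid : List Char} (hm : ':' ∉ mid) (n : List Char) :
    (n == mid || PySem.Chars.startswith n (mid ++ [':'])) = ((pyPartitionColon n).1 == mid) := by
  rcases partColon_cases n with ⟨hn, hp⟩ | ⟨b, t, hb, he, hp⟩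
  · rw [hp]
    have hsw : PySem.Chars.startswith n (mid ++ [':']) = false := by
      by_contra h
      have := (PySem.Chars.startswith_iff n (mid ++ [':'])).mp (by revert h; cases PySem.Chars.startswith n (mid ++ [':']) <;> simp)
      exact hn (this.mem (by simp))
    simp [hsw]
  · rw [hp]
    have hne : (n == mid) = false := by
      simp only [beq_eq_false_iff_ne, ne_eq]
      intro hnm
      exact hm (hnm ▸ (he ▸ (by simp : (':' : Char) ∈ b ++ ':' :: t)))
    rw [hne]
    by_cases hbm : b = mid
    · subst hbm
      have : PySem.Chars.startswith n (b ++ [':']) = true := by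
        rw [PySem.Chars.startswith_iff, he]
        exact ⟨t, by simp⟩
      simp [this]
    · have hsw : PySem.Chars.startswith n (mid ++ [':']) = false := by
        by_contra h
        have hpre := (PySem.Chars.startswith_iff n (mid ++ [':'])).mp (by revert h; cases PySem.Chars.startswith n (mid ++ [':']) <;> simp)
        obtain ⟨r, hr⟩ := hpre
        have : pyPartitionColon n = (mid, true, r) := by
          rw [← hr, show mid ++ [':'] ++ r = mid ++ ':' :: r by simp]
          exact partColon_yes r hm
        rw [this] at hp
        injection hp with h1 h2
        exact hbm h1.symm
      simp [hsw, hbm]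
          
-- inside the colon branch, "n == mid" is subsumed by the base/tag comparison
theorem pointwise_colon {base tag : List Char} (hb : ':' ∉ base) (n : List Char) :
    (n == (base ++ ':' :: tag) || ((pyPartitionColon n).1 == base && (pyPartitionColon n).2.2 == tag))
      = ((pyPartitionColon n).1 == base && (pyPartitionColon n).2.2 == tag) := by
  by_cases hnm : n = base ++ ':' :: tag
  · subst hnm
    rw [partColon_yes tag hb]
    simp
  · simp [hnm]

theorem model_id_in_runtime_name_set_spec : Claim_equal_model_id_in_runtime_name_set := by
  intro names model_id _dom
  unfold Spec_model_id_in_runtime_name_set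
  unfold model_id_in_runtime_name_set model_id_in_runtime_name_set_alt
  simp only [List.isEmpty_map]
  by_cases hguard : (PySem.Chars.strip model_id.toList).isEmpty || names.isEmpty
  · simp [hguard]
  · simp only [hguard, if_false, Bool.false_eq_true]
    rcases partColon_cases (PySem.Chars.strip model_id.toList) with ⟨hm, hp⟩ | ⟨base, tag, hbase, he, hp⟩
    · rw [isInColon, hp]
      simp only [Bool.not_false, if_true]
      rw [idx_contains, PySem.Dict.contains_empty, Bool.false_or]
      by_cases hc : (names.map String.toList).contains (PySem.Chars.strip model_id.toList) = true
      · rw [if_pos hc]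
        symm
        rw [List.any_eq_true]
        obtain ⟨n, hn, hx⟩ := List.mem_map.mp (List.mem_of_elem_eq_true hc)
        exact ⟨n, hn, by simp [hx, hp]⟩
      · rw [if_neg hc, List.any_map]
        congr 1
        funext n
        simp only [Function.comp]
        exact pointwise_nocolon hm n.toList
    · rw [isInColon, hp]
      simp only [Bool.not_true, Bool.false_eq_true, if_false]
      rw [idx_getD, PySem.Dict.getD_empty]
      simp only [PySem.Set.contains_eq_listContains, PySem.Set.empty, List.contains_nil, Bool.false_or]
      by_cases hc : (names.map String.toList).contains (PySem.Chars.strip model_id.toList) = true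
      · rw [if_pos hc]
        symm
        rw [List.any_eq_true]
        obtain ⟨n, hn, hx⟩ := List.mem_map.mp (List.mem_of_elem_eq_true hc)
        exact ⟨n, hn, by simp [hx, hp]⟩
      · rw [if_neg hc, List.any_map]
        congr 1
        funext n
        simp only [Function.comp]
        have := pointwise_colon hbase (tag := tag) n.toList
        rw [← he] at this
        exact this
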